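-- pv_equiv track=rewrite | github.com/very-scary-scenario/richard | ayoade.py | combine_sentences
-- ===== SOURCE A (Python) =====
-- def combine_sentences(subs):
--     skip_next = False
--     total = len(subs)
--
--     for i, sub in enumerate(subs):
--         if skip_next:
--             skip_next = False
--             continue
--
--         if i == (total - 1):
--             yield sub
--             break
--
--         next_sub = subs[i + 1]
--         if (
--             i != (total - 1) and
--             sub and next_sub and
--             sub[-1] not in ('.', '?', '!') and
--             next_sub[0] != next_sub[0].upper()
--         ):
--             yield '{} {}'.format(sub, next_sub)
--             skip_next = True
--         else:
--             yield sub
-- ===== SOURCE B (Python) =====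
-- def combine_sentences(subs):
--     n = len(subs)
--     # Stage 1: local merge conditions at each boundary i/i+1 (no loop state).
--     guards = [
--         bool(subs[i] and subs[i + 1] and
--              subs[i][-1] not in ('.', '?', '!') and
--              subs[i + 1][0] != subs[i + 1][0].upper())
--         for i in range(n - 1)
--     ]
--     # Stage 2: within each maximal run of consecutive true guards, merges
--     # happen at the 1st, 3rd, ... boundary of the run, i.e. exactly where the
--     # streak length of true guards ending at that boundary is odd.
--     streak = []
--     run = 0
--     for g in guards:
--         run = run + 1 if g else 0
--         streak.append(run)
--     merge = [s % 2 == 1 for s in streak] + [False]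
--     # Stage 3: emit; element i is consumed iff the boundary to its left merged.
--     for i in range(n):
--         if not (i > 0 and merge[i - 1]):
--             if merge[i]:
--                 yield '{} {}'.format(subs[i], subs[i + 1])
--             else:
--                 yield subs[i]
-- ===== Notes on version B (the rewrite author's own statement) =====
-- stated objective: alternative
-- what changed: Replaces A's stateful single pass with a skip_next flag by three staged passes: compute the local merge guard at every boundary, turn guard streaks into merge decisions via run-length parity (merge exactly at odd streak positions), then emit from the precomputed decision table.
import Mathlib
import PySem

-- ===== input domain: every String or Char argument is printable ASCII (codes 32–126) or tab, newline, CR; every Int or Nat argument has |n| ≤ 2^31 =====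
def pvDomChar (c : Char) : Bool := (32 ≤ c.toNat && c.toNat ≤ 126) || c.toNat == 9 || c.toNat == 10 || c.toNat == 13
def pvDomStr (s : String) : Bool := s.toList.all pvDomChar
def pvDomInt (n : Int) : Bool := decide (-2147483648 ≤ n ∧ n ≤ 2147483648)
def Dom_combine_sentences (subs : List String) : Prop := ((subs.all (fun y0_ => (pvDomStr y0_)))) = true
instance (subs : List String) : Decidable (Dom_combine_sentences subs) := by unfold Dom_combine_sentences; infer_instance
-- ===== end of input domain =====

-- B replaces A's stateful skip_next pass by three staged passes (local guards, streak
-- parity for the merge decisions, emit from the table); alternative decomposition,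
-- no speed claim. Both Pythons are generators; equivalence is about the yielded list.

-- the merge guard both Pythons contain verbatim:
-- sub and next_sub and sub[-1] not in ('.', '?', '!') and next_sub[0] != next_sub[0].upper()
def pvGuard (s t : List Char) : Bool :=
  !s.isEmpty && !t.isEmpty &&
  (match PySem.List.pyGet? s (-1) with
   | some c => !(c == '.' || c == '?' || c == '!')
   | none => true) &&
  (match PySem.List.pyGet? t 0 with
   | some c => c != PySem.Chars.upperChar c
   | none => false)

-- ===== PORT A =====
-- loop over `enumerate(subs)` carrying the skip_next flag; `break` at the last index
-- yields the current sub and stops. subs[i+1] is in range when i ≠ total-1, so pyGetD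
-- with default [] is exact there.
def pvAgo (cs : List (List Char)) (total : Int) :
    List (Int × List Char) → Bool → List (List Char)
  | [], _ => []
  | (i, sub) :: rest, skip =>
    if skip then pvAgo cs total rest false
    else if i = total - 1 then [sub]
    else
      let next_sub := PySem.List.pyGetD cs (i + 1) []
      if decide ((i : Int) ≠ total - 1) && pvGuard sub next_sub then
        (sub ++ ' ' :: next_sub) :: pvAgo cs total rest true
      else
        sub :: pvAgo cs total rest false

def combine_sentences (subs : List String) : List String :=
  let cs := subs.map String.toList
  (pvAgo cs (cs.length : Int) (PySem.List.enumerate cs 0) false).map String.ofList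

-- ===== PORT B =====
-- stage 2: the `run`/`streak` loop (append-accumulation written as cons-recursion)
def pvStreak : List Bool → Nat → List Nat
  | [], _ => []
  | g :: gs, run =>
    let run' := if g then run + 1 else 0
    run' :: pvStreak gs run'

-- stage 3: `for i in range(n)` emitting unless the left boundary merged
def pvEmit (cs : List (List Char)) (n : Nat) (merge : List Bool) (i : Nat) :
    List (List Char) :=
  if _h : i < n then
    if decide (0 < i) && merge.getD (i - 1) false then pvEmit cs n merge (i + 1)
    else if merge.getD i false then
      (cs.getD i [] ++ ' ' :: cs.getD (i + 1) []) :: pvEmit cs n merge (i + 1)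
    else
      cs.getD i [] :: pvEmit cs n merge (i + 1)
  else []
termination_by n - i

def combine_sentences_alt (subs : List String) : List String :=
  let cs := subs.map String.toList
  let n := cs.length
  let guards := (List.range (n - 1)).map
    (fun i => pvGuard (cs.getD i []) (cs.getD (i + 1) []))
  let merge := ((pvStreak guards 0).map (fun s => s % 2 == 1)) ++ [false]
  (pvEmit cs n merge 0).map String.ofList

-- ===== PRECONDITION & SPEC =====
def Spec_combine_sentences (subs : List String) (out : List String) : Prop := out = combine_sentences_alt subs
instance (subs : List String) (out : List String) : Decidable (Spec_combine_sentences subs out) := by unfold Spec_combine_sentences; infer_instance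

-- ===== CLAIM (what is proved, stated in full; the proofs are below) =====
def Claim_equal_combine_sentences : Prop := ∀ (subs : List String), Dom_combine_sentences subs → Spec_combine_sentences subs (combine_sentences subs)

-- ===== LEMMAS AND PROOFS =====

-- proof-only intermediate: the same traversal as A written index-first
def pvBgo (cs : List (List Char)) (n : Nat) (i : Nat) : List (List Char) :=
  if _h : i < n then
    let sub := cs.getD i []
    if i = n - 1 then [sub]
    else
      let next_sub := cs.getD (i + 1) []
      if pvGuard sub next_sub then
        (sub ++ ' ' :: next_sub) :: pvBgo cs n (i + 2)
      else
        sub :: pvBgo cs n (i + 1)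
  else []
termination_by n - i

-- skip_next consumed: the A-loop drops the head and clears the flag
theorem pvAgo_skip (cs : List (List Char)) (total : Int) (p : Int × List Char)
    (rest : List (Int × List Char)) :
    pvAgo cs total (p :: rest) true = pvAgo cs total rest false := by
  obtain ⟨i, sub⟩ := p
  rw [pvAgo]
  simp

-- A's loop from position i (skip flag down) equals the index-first loop from i.
theorem pvAgo_eq_pvBgo (cs : List (List Char)) (i : Nat) :
    pvAgo cs (cs.length : Int) (PySem.List.enumerate (cs.drop i) (i : Int)) false
      = pvBgo cs cs.length i := by
  by_cases h : i < cs.length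
  · have hdrop : cs[i] :: cs.drop (i + 1) = cs.drop i := List.getElem_cons_drop h
    rw [← hdrop, PySem.List.enumerate_cons, pvAgo, pvBgo, dif_pos h]
    simp only [Bool.false_eq_true, if_false]
    have hgetD : cs.getD i ([] : List Char) = cs[i] := by
      simp [List.getD_eq_getElem?_getD, List.getElem?_eq_getElem h]
    by_cases hlast : i = cs.length - 1
    · rw [if_pos (by omega : ((i : Nat) : Int) = (cs.length : Int) - 1), if_pos hlast, hgetD]
    · have hi1 : i + 1 < cs.length := by omega
      have hnext : PySem.List.pyGetD cs ((i : Int) + 1) ([] : List Char) = cs[i + 1] := by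
        rw [show ((i : Int) + 1) = ((i + 1 : Nat) : Int) by push_cast; ring,
          PySem.List.pyGetD_natCast, List.getD_eq_getElem?_getD,
          List.getElem?_eq_getElem hi1, Option.getD_some]
      have hgetD1 : cs.getD (i + 1) ([] : List Char) = cs[i + 1] := by
        simp [List.getD_eq_getElem?_getD, List.getElem?_eq_getElem hi1]
      rw [if_neg (by omega : ¬ ((i : Nat) : Int) = (cs.length : Int) - 1), if_neg hlast]
      simp only [hnext, hgetD, hgetD1]
      have hdec : decide ((i : Int) ≠ (cs.length : Int) - 1) = true := by
        simp only [decide_eq_true_eq]; omega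
      rw [hdec, Bool.true_and]
      by_cases hg : pvGuard cs[i] cs[i + 1] = true
      · rw [if_pos hg, if_pos hg]
        have hdrop1 : cs[i + 1] :: cs.drop (i + 2) = cs.drop (i + 1) :=
          List.getElem_cons_drop hi1
        rw [← hdrop1, PySem.List.enumerate_cons, pvAgo_skip,
          show ((i : Int) + 1 + 1) = ((i + 2 : Nat) : Int) by push_cast; ring,
          pvAgo_eq_pvBgo cs (i + 2)]
      · rw [if_neg hg, if_neg hg,
          show ((i : Int) + 1) = ((i + 1 : Nat) : Int) by push_cast; ring,
          pvAgo_eq_pvBgo cs (i + 1)]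
  · have hnil : cs.drop i = [] := List.drop_eq_nil_of_le (by omega)
    rw [hnil, PySem.List.enumerate_nil, pvAgo, pvBgo]
    simp [h]
termination_by cs.length - i

-- the merge decisions as a stateful recurrence m_i = g_i && !m_{i-1}
def mergeRecList : List Bool → Bool → List Bool
  | [], _ => []
  | g :: gs, prev =>
    let m := g && !prev
    m :: mergeRecList gs m

-- the same recurrence as an indexed function
def mfun : List Bool → Bool → Nat → Bool
  | [], _, _ => false
  | g :: _, prev, 0 => g && !prev
  | g :: gs, prev, i + 1 => mfun gs (g && !prev) i

theorem streak_parity (G : List Bool) (run : Nat) :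
    (pvStreak G run).map (fun s => s % 2 == 1) = mergeRecList G (run % 2 == 1) := by
  induction G generalizing run with
  | nil => rfl
  | cons g gs ih =>
    rw [pvStreak, mergeRecList]
    simp only [List.map_cons]
    have hpar : ((if g then run + 1 else 0) % 2 == 1) = (g && !(run % 2 == 1)) := by
      rcases Nat.mod_two_eq_zero_or_one run with h | h <;> cases g <;>
        simp [Nat.add_mod, h]
    rw [ih, hpar]

theorem mergeRecList_getD (G : List Bool) (prev : Bool) (i : Nat) :
    (mergeRecList G prev ++ [false]).getD i false = mfun G prev i := by
  induction G generalizing prev i with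
  | nil =>
    cases i <;> simp [mergeRecList, mfun, List.getD]
  | cons g gs ih =>
    cases i with
    | zero => simp [mergeRecList, mfun, List.getD]
    | succ j => simpa [mergeRecList, mfun, List.getD] using ih (g && !prev) j

theorem mfun_zero (G : List Bool) (prev : Bool) :
    mfun G prev 0 = (G.getD 0 false && !prev) := by
  cases G <;> simp [mfun, List.getD]

theorem mfun_succ (G : List Bool) (prev : Bool) (i : Nat) :
    mfun G prev (i + 1) = (G.getD (i + 1) false && !(mfun G prev i)) := by
  induction G generalizing prev i with
  | nil => simp [mfun, List.getD]
  | cons g gs ih =>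
    cases i with
    | zero => simp [mfun, mfun_zero, List.getD]
    | succ j => simpa [mfun, List.getD] using ih (g && !prev) j

-- abbreviation used only in the proofs below
def pvG (cs : List (List Char)) : List Bool :=
  (List.range (cs.length - 1)).map
    (fun i => pvGuard (cs.getD i []) (cs.getD (i + 1) []))

theorem pvG_getD (cs : List (List Char)) (i : Nat) (h : i < cs.length - 1) :
    (pvG cs).getD i false = pvGuard (cs.getD i []) (cs.getD (i + 1) []) := by
  simp [pvG, List.getD_eq_getElem?_getD, h]

theorem pvG_length (cs : List (List Char)) : (pvG cs).length = cs.length - 1 := by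
  simp [pvG]

-- the index-first traversal equals the table-driven emitter, at every
-- non-consumed index i
theorem pvBgo_eq_pvEmit (cs : List (List Char)) (i : Nat)
    (hc : i = 0 ∨ mfun (pvG cs) false (i - 1) = false) :
    pvBgo cs cs.length i
      = pvEmit cs cs.length (mergeRecList (pvG cs) false ++ [false]) i := by
  by_cases h : i < cs.length
  · have hconsumed : (decide (0 < i) &&
        (mergeRecList (pvG cs) false ++ [false]).getD (i - 1) false) = false := by
      rcases hc with h0 | hm
      · simp [h0]
      · rw [mergeRecList_getD, hm]; simp
    rw [pvBgo, pvEmit, dif_pos h, dif_pos h, hconsumed]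
    simp only [Bool.false_eq_true, if_false]
    have hmi : mfun (pvG cs) false i =
        (pvG cs).getD i false := by
      cases i with
      | zero => simp [mfun_zero]
      | succ j =>
        rcases hc with h0 | hm
        · omega
        · simp only [Nat.add_sub_cancel] at hm
          rw [mfun_succ, hm]; simp
    by_cases hlast : i = cs.length - 1
    · have hGi : (pvG cs).getD i false = false := by
        apply List.getD_eq_default
        rw [pvG_length]; omega
      rw [if_pos hlast, mergeRecList_getD, hmi, hGi]
      simp only [Bool.false_eq_true, if_false]
      rw [pvEmit, dif_neg (by omega : ¬ i + 1 < cs.length)]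
    · have hi1 : i < cs.length - 1 := by omega
      rw [if_neg hlast, mergeRecList_getD, hmi, pvG_getD cs i hi1]
      by_cases hg : pvGuard (cs.getD i []) (cs.getD (i + 1) []) = true
      · rw [if_pos hg, if_pos hg]
        -- emitter consumes i+1, then agrees with pvBgo from i+2
        have hstep : pvEmit cs cs.length (mergeRecList (pvG cs) false ++ [false]) (i + 1)
            = pvEmit cs cs.length (mergeRecList (pvG cs) false ++ [false]) (i + 2) := by
          rw [pvEmit, dif_pos (by omega : i + 1 < cs.length)]
          have : (decide (0 < i + 1) &&
              (mergeRecList (pvG cs) false ++ [false]).getD (i + 1 - 1) false) = true := by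
            simp only [Nat.add_sub_cancel]
            rw [mergeRecList_getD, hmi, pvG_getD cs i hi1, hg]; simp
          rw [this]; simp
        rw [hstep, pvBgo_eq_pvEmit cs (i + 2)]
        right
        show mfun (pvG cs) false (i + 1) = false
        rw [mfun_succ, hmi, pvG_getD cs i hi1, hg]; simp
      · rw [if_neg hg, if_neg hg,
          pvBgo_eq_pvEmit cs (i + 1) (Or.inr (by
            show mfun (pvG cs) false i = false
            rw [hmi, pvG_getD cs i hi1]
            simpa using hg))]
  · rw [pvBgo, pvEmit, dif_neg h, dif_neg h]
termination_by cs.length - i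

-- ===== VERDICT (by name: the statement is the Claim_ definition above) =====
theorem combine_sentences_spec : Claim_equal_combine_sentences := by
  intro subs _
  unfold Spec_combine_sentences combine_sentences combine_sentences_alt
  simp only []
  have h1 := pvAgo_eq_pvBgo (subs.map String.toList) 0
  have h2 := pvBgo_eq_pvEmit (subs.map String.toList) 0 (Or.inl rfl)
  have h3 : ((pvStreak (pvG (subs.map String.toList)) 0).map (fun s => s % 2 == 1)) ++ [false]
      = mergeRecList (pvG (subs.map String.toList)) false ++ [false] := by
    rw [streak_parity]; rfl
  simp only [List.drop_zero, Nat.cast_zero] at h1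
  rw [h1, h2]
  exact congrArg (List.map String.ofList)
    (congrArg (fun m => pvEmit (subs.map String.toList) (subs.map String.toList).length m 0)
      h3.symm)
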